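-- pv_equiv track=rewrite | github.com/RahmanTeamDevelopment/RefSeqDB | refseqdb/mapping.py | calculate_exon_coordinates
-- ===== SOURCE A (Python) =====
-- def calculate_exon_coordinates(exon_lengths, intron_lengths, start_pos):
--     """Calculate exon coordinates"""
--
--     exon_starts = []
--     exon_ends = []
--
--     p = start_pos
--     for i in range(len(exon_lengths)):
--         exon_starts.append(p)
--         exon_ends.append(p + exon_lengths[i])
--         if i == len(exon_lengths) - 1:
--             break
--         p += exon_lengths[i] + intron_lengths[i]
--
--     return exon_starts, exon_ends
-- ===== SOURCE B (Python) =====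
-- def calculate_exon_coordinates(exon_lengths, intron_lengths, start_pos):
--     """Calculate exon coordinates"""
--     n = len(exon_lengths)
--     if n == 0:
--         return [], []
--     # absolute end of the LAST exon, computed once from the totals; then a
--     # backward walk subtracts each exon/intron length, building reversed lists
--     pos = start_pos + sum(exon_lengths) + sum(intron_lengths[:n - 1])
--     rev_starts, rev_ends = [], []
--     for i in range(n - 1, -1, -1):
--         rev_ends.append(pos)
--         pos -= exon_lengths[i]
--         rev_starts.append(pos)
--         if i > 0:
--             pos -= intron_lengths[i - 1]
--     return rev_starts[::-1], rev_ends[::-1]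
-- ===== Notes on version B (the rewrite author's own statement) =====
-- stated objective: alternative
-- what changed: Instead of accumulating a forward running position, B computes the end of the LAST exon once from the totals (start_pos + sum(exon_lengths) + sum(intron_lengths[:n-1])) and then walks BACKWARDS over the exons subtracting lengths, building both coordinate lists in reverse and reversing them at the end.
import Mathlib
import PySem

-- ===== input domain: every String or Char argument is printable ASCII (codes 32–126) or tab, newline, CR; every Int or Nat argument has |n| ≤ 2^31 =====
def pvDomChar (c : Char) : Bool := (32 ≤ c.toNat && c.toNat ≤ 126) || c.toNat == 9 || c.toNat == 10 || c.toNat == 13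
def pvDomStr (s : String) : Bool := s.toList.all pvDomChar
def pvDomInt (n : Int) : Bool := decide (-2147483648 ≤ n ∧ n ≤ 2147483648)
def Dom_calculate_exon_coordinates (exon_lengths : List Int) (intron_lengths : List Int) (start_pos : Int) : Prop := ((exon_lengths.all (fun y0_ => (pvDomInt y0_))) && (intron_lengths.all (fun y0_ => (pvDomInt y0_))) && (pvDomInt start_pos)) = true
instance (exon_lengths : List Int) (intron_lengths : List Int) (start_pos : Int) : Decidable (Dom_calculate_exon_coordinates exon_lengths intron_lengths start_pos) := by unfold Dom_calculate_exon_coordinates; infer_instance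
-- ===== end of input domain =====

-- B computes the last exon's end once from the totals, then walks BACKWARDS subtracting
-- lengths, building both lists reversed (alternative decomposition, same cost).

-- ===== PORT A =====
-- the for-loop over range(len(exon_lengths)) with its early break; state = (p, exon_starts, exon_ends)
def pvLoopA (el il : List Int) (n : Nat) : List Nat → Int → List Int → List Int → List Int × List Int
  | [], _, ss, es => (ss, es)
  | i :: rest, p, ss, es =>
    let e := (PySem.List.pyGet? el (i : Int)).getD 0   -- exon_lengths[i]; in range since i < n
    let ss' := ss ++ [p]
    let es' := es ++ [p + e]
    if i = n - 1 then (ss', es')                       -- break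
    else pvLoopA el il n rest (p + e + (PySem.List.pyGet? il (i : Int)).getD 0) ss' es'
      -- intron_lengths[i]: Pre_ guarantees i ≤ n-2 < intron_lengths.length (Python raises IndexError otherwise)

def calculate_exon_coordinates (exon_lengths : List Int) (intron_lengths : List Int) (start_pos : Int) : List Int × List Int :=
  pvLoopA exon_lengths intron_lengths exon_lengths.length (List.range exon_lengths.length) start_pos [] []

-- ===== PORT B =====
-- the backward loop over range(n-1, -1, -1); state = (pos, rev_starts, rev_ends)
def pvLoopB (el il : List Int) : List Int → Int → List Int → List Int → List Int × List Int
  | [], _, rs, re => (rs, re)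
  | i :: rest, pos, rs, re =>
    let re' := re ++ [pos]
    let pos1 := pos - (PySem.List.pyGet? el i).getD 0          -- exon_lengths[i]
    let rs' := rs ++ [pos1]
    let pos2 := if 0 < i then pos1 - (PySem.List.pyGet? il (i - 1)).getD 0 else pos1
      -- intron_lengths[i-1]: Pre_ guarantees i-1 ≤ n-2 < intron_lengths.length
    pvLoopB el il rest pos2 rs' re'

def calculate_exon_coordinates_alt (exon_lengths : List Int) (intron_lengths : List Int) (start_pos : Int) : List Int × List Int :=
  let n := exon_lengths.length
  if n = 0 then ([], [])
  else
    -- pos = start_pos + sum(exon_lengths) + sum(intron_lengths[:n-1])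
    let pos0 := start_pos + exon_lengths.sum + (PySem.List.slice intron_lengths none (some ((n : Int) - 1))).sum
    let (rs, re) := pvLoopB exon_lengths intron_lengths (PySem.List.pyRange ((n : Int) - 1) (-1) (-1)) pos0 [] []
    (rs.reverse, re.reverse)   -- rev_starts[::-1], rev_ends[::-1]: [::-1] is reverse (PySem.List.slice?_none_none_neg_one)

-- ===== PRECONDITION & SPEC =====
-- Pre_ excludes exactly the inputs where Python A raises IndexError (intron list shorter than
-- len(exon_lengths)-1); Python B raises there identically.
def Pre_calculate_exon_coordinates (exon_lengths : List Int) (intron_lengths : List Int) (start_pos : Int) : Prop :=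
  exon_lengths.length ≤ intron_lengths.length + 1
instance (exon_lengths : List Int) (intron_lengths : List Int) (start_pos : Int) : Decidable (Pre_calculate_exon_coordinates exon_lengths intron_lengths start_pos) := by unfold Pre_calculate_exon_coordinates; infer_instance

def pvWitness_calculate_exon_coordinates : List Int × List Int × Int := ([3, 5, 2], [10, 20], 100)

def Spec_calculate_exon_coordinates (exon_lengths : List Int) (intron_lengths : List Int) (start_pos : Int) (out : List Int × List Int) : Prop := out = calculate_exon_coordinates_alt exon_lengths intron_lengths start_pos
instance (exon_lengths : List Int) (intron_lengths : List Int) (start_pos : Int) (out : List Int × List Int) : Decidable (Spec_calculate_exon_coordinates exon_lengths intron_lengths start_pos out) := by unfold Spec_calculate_exon_coordinates; infer_instance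

-- ===== CLAIM (what is proved, stated in full; the proofs are below) =====
def Claim_equal_calculate_exon_coordinates : Prop := ∀ (exon_lengths : List Int) (intron_lengths : List Int) (start_pos : Int), Dom_calculate_exon_coordinates exon_lengths intron_lengths start_pos → Pre_calculate_exon_coordinates exon_lengths intron_lengths start_pos → Spec_calculate_exon_coordinates exon_lengths intron_lengths start_pos (calculate_exon_coordinates exon_lengths intron_lengths start_pos)

-- ===== LEMMAS AND PROOFS =====

-- the common closed form: start of exon j
def pvF (el il : List Int) (sp : Int) (j : Nat) : Int := sp + (el.take j).sum + (il.take j).sum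

theorem pvGet_getD (xs : List Int) (i : Nat) (h : i < xs.length) :
    (PySem.List.pyGet? xs (i : Int)).getD 0 = xs[i] := by
  rw [PySem.List.pyGet?_natCast, List.getElem?_eq_getElem h]; rfl

theorem pvF_succ (el il : List Int) (sp : Int) (i : Nat) (he : i < el.length) (hi : i < il.length) :
    pvF el il sp (i + 1) = pvF el il sp i + el[i] + il[i] := by
  unfold pvF
  rw [List.take_add_one, List.take_add_one, List.getElem?_eq_getElem he, List.getElem?_eq_getElem hi]
  simp only [Option.toList_some, List.sum_append, List.sum_cons, List.sum_nil]
  ring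

theorem pvLoopA_eq (el il : List Int) (sp : Int) (hpre : el.length ≤ il.length + 1) :
    ∀ (k i : Nat), i + k + 1 = el.length →
    ∀ (ss es : List Int),
    pvLoopA el il el.length (List.range' i (k + 1)) (pvF el il sp i) ss es =
      (ss ++ (List.range' i (k + 1)).map (pvF el il sp),
       es ++ (List.range' i (k + 1)).map (fun j => pvF el il sp j + el.getD j 0)) := by
  intro k
  induction k with
  | zero =>
    intro i hi ss es
    have hi' : i < el.length := by omega
    have hlast : i = el.length - 1 := by omega
    simp only [List.range'_succ, List.range'_zero, pvLoopA, pvGet_getD el i hi', if_pos hlast,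
      List.map_cons, List.map_nil]
    simp [List.getD, List.getElem?_eq_getElem hi']
  | succ k ih =>
    intro i hi ss es
    have hi' : i < el.length := by omega
    have hil : i < il.length := by omega
    have hne : ¬ i = el.length - 1 := by omega
    rw [List.range'_succ]
    simp only [pvLoopA, pvGet_getD el i hi', pvGet_getD il i hil, if_neg hne]
    rw [show pvF el il sp i + el[i] + il[i] = pvF el il sp (i + 1) from (pvF_succ el il sp i hi' hil).symm]
    rw [ih (i + 1) (by omega)]
    simp [List.getD, List.getElem?_eq_getElem hi']

theorem pvLoopB_eq (el il : List Int) (sp : Int) (hpre : el.length ≤ il.length + 1) :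
    ∀ (i : Nat), i < el.length →
    ∀ (rs re : List Int),
    pvLoopB el il (PySem.List.pyRange (i : Int) (-1) (-1)) (pvF el il sp i + el.getD i 0) rs re =
      (rs ++ ((List.range (i + 1)).map (pvF el il sp)).reverse,
       re ++ ((List.range (i + 1)).map (fun j => pvF el il sp j + el.getD j 0)).reverse) := by
  intro i
  induction i with
  | zero =>
    intro h0 rs re
    rw [show ((0 : Nat) : Int) = 0 by norm_num]
    rw [PySem.List.pyRange_neg_one_cons (by omega), PySem.List.pyRange_neg_one_eq_nil (by omega)]
    simp only [pvLoopB]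
    have hg : (PySem.List.pyGet? el (0 : Int)).getD 0 = el[0] := by
      simpa using pvGet_getD el 0 h0
    rw [hg]
    simp [List.getD, List.getElem?_eq_getElem h0, add_sub_cancel_right]
  | succ i ih =>
    intro hlt rs re
    have hi' : i < el.length := by omega
    have hil : i < il.length := by omega
    rw [show ((i + 1 : Nat) : Int) = (i : Int) + 1 by push_cast; ring]
    rw [PySem.List.pyRange_neg_one_cons (by omega)]
    simp only [pvLoopB]
    rw [if_pos (by omega)]
    rw [show (i : Int) + 1 - 1 = (i : Int) by ring]
    rw [pvGet_getD il i hil]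
    rw [show ((i : Int) + 1) = ((i + 1 : Nat) : Int) by push_cast; ring, pvGet_getD el (i + 1) hlt]
    have hkey : pvF el il sp (i + 1) + el.getD (i + 1) 0 - el[i + 1] - il[i] = pvF el il sp i + el.getD i 0 := by
      rw [List.getD_eq_getElem _ _ hlt, List.getD_eq_getElem _ _ hi', pvF_succ el il sp i hi' hil]; ring
    rw [hkey, ih hi']
    rw [List.range_succ (n := i + 1)]
    simp [List.getD, List.getElem?_eq_getElem hlt, add_sub_cancel_right]

-- ===== VERDICT (by name: the statement is the Claim_ definition above) =====
theorem calculate_exon_coordinates_spec : Claim_equal_calculate_exon_coordinates := by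
  intro el il sp _ hpre
  unfold Spec_calculate_exon_coordinates
  rcases Nat.eq_zero_or_pos el.length with h0 | hpos
  · unfold calculate_exon_coordinates calculate_exon_coordinates_alt
    simp [h0, pvLoopA]
  · have hn1 : el.length - 1 < el.length := by omega
    have hA : calculate_exon_coordinates el il sp =
        ((List.range el.length).map (pvF el il sp),
         (List.range el.length).map (fun j => pvF el il sp j + el.getD j 0)) := by
      unfold calculate_exon_coordinates
      have h := pvLoopA_eq el il sp hpre (el.length - 1) 0 (by omega) [] []
      rw [show pvF el il sp 0 = sp by simp [pvF]] at h
      rw [show el.length - 1 + 1 = el.length by omega] at h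
      rw [List.range_eq_range', h]
      simp
    have hslice : PySem.List.slice il none (some ((el.length : Int) - 1)) = il.take (el.length - 1) := by
      rw [PySem.List.slice_to il (by omega)]
      congr 1; omega
    have hel : el.sum = (el.take (el.length - 1)).sum + el.getD (el.length - 1) 0 := by
      conv_lhs => rw [show el = el.take (el.length - 1) ++ el.drop (el.length - 1) from
        (List.take_append_drop _ el).symm]
      rw [List.sum_append, List.drop_eq_getElem_cons hn1, List.drop_eq_nil_of_le (by omega)]
      simp [List.getD, List.getElem?_eq_getElem hn1]
    have hpos0 : sp + el.sum + (PySem.List.slice il none (some ((el.length : Int) - 1))).sum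
        = pvF el il sp (el.length - 1) + el.getD (el.length - 1) 0 := by
      rw [hslice, hel]
      unfold pvF
      ring
    have hr := pvLoopB_eq el il sp hpre (el.length - 1) hn1 [] []
    rw [show (el.length - 1) + 1 = el.length by omega] at hr
    have hB : calculate_exon_coordinates_alt el il sp =
        ((List.range el.length).map (pvF el il sp),
         (List.range el.length).map (fun j => pvF el il sp j + el.getD j 0)) := by
      simp only [calculate_exon_coordinates_alt]
      rw [if_neg (by omega)]
      rw [show ((el.length : Int) - 1) = ((el.length - 1 : Nat) : Int) by omega]
      rw [show ((el.length - 1 : Nat) : Int) = ((el.length : Int) - 1) by omega] at hr ⊢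
      rw [hpos0, hr]
      simp
    rw [hA, hB]
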